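-- pv_equiv track=rewrite | github.com/ValmirNogFilho/PBL3-CopaDoMundoStats | pbl3_valmir_alves_nogueira_filho.py | jogosCadaGrupo
-- ===== SOURCE A (Python) =====
-- def jogosCadaGrupo(grupo, lista): #função recursiva que retorna lista das partidas de um grupo
--     if len(grupo) == 2:
--         time = grupo.pop(0)
--         for i in range(len(grupo)):
--             lista.append(f'{time} x {grupo[i]}')
--         return lista
--     else:
--         time = grupo.pop(0)
--         for i in range(len(grupo)):
--             lista.append(f'{time} x {grupo[i]}')
--         return jogosCadaGrupo(grupo, lista)
-- ===== SOURCE B (Python) =====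
-- # All round-robin matches of a group: every i<j pair, appended to `lista`.
-- # (Unlike the recursive original, this does not consume `grupo`; the claimed
-- # equivalence is about the return value only.)
-- def jogosCadaGrupo(grupo, lista):
--     n = len(grupo)
--     lista.extend(f'{grupo[i]} x {grupo[j]}' for i in range(n - 1) for j in range(i + 1, n))
--     return lista
-- ===== Notes on version B (the rewrite author's own statement) =====
-- stated objective: simpler
-- what changed: replaces the length-guarded recursion that destructively pops the head by a single nested i<j index comprehension (B leaves grupo untouched; the claim is about the return value); Pre_ excludes groups of fewer than 2 teams, on which A's pop(0) raises IndexError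
import Mathlib
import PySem

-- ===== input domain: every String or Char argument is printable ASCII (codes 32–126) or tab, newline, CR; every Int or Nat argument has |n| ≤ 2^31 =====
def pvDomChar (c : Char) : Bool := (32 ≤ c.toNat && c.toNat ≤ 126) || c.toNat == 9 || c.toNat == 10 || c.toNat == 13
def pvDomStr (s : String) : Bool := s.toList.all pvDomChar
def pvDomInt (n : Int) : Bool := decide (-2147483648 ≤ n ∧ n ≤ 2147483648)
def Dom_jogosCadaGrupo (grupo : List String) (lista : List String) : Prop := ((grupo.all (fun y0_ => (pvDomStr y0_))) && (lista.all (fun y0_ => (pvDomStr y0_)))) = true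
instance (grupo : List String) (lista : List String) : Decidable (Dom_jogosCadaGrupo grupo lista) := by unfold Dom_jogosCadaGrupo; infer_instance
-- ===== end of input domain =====

-- B lists all i<j index pairs in one nested comprehension instead of A's pop-and-recurse;
-- objective: simpler. Equivalence is about the RETURN value only: both Pythons extend
-- `lista` in place, but A also consumes `grupo` down to one element while B leaves it intact.

-- ===== PORT A =====
-- A pops the head, appends 'head x t' for each remaining t, and recurses until the
-- group has exactly 2 teams; the `[]` branches are unreachable under Pre_ (in Python,
-- `pop(0)` on an empty list raises IndexError there).
def jogosCadaGrupo (grupo : List String) (lista : List String) : List String :=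
  if grupo.length == 2 then
    match grupo with
    | [] => lista
    | time :: rest => lista ++ rest.map (fun t => time ++ " x " ++ t)
  else
    match grupo with
    | [] => lista
    | time :: rest => jogosCadaGrupo rest (lista ++ rest.map (fun t => time ++ " x " ++ t))

-- ===== PORT B =====
-- Source B: lista.extend(f'{grupo[i]} x {grupo[j]}' for i in range(n-1) for j in range(i+1, n)).
-- Python range(a, b) with 0 ≤ a ≤ b is List.range' a (b - a); both indices are always in
-- range, so `getD _ ""` is exact for grupo[i]/grupo[j].
def jogosCadaGrupo_alt (grupo : List String) (lista : List String) : List String :=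
  lista ++ (List.range (grupo.length - 1)).flatMap (fun i =>
    (List.range' (i + 1) (grupo.length - (i + 1))).map (fun j =>
      grupo.getD i "" ++ " x " ++ grupo.getD j ""))

-- ===== PRECONDITION & SPEC =====
-- Pre_ excludes exactly the inputs on which A raises: with fewer than 2 teams, A's
-- `grupo.pop(0)` eventually runs on an empty list and raises IndexError.
def Pre_jogosCadaGrupo (grupo : List String) (lista : List String) : Prop := 2 ≤ grupo.length
instance (grupo : List String) (lista : List String) : Decidable (Pre_jogosCadaGrupo grupo lista) := by unfold Pre_jogosCadaGrupo; infer_instance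
def pvWitness_jogosCadaGrupo : List String × List String := (["a", "b", "c"], ["x"])

def Spec_jogosCadaGrupo (grupo : List String) (lista : List String) (out : List String) : Prop := out = jogosCadaGrupo_alt grupo lista
instance (grupo : List String) (lista : List String) (out : List String) : Decidable (Spec_jogosCadaGrupo grupo lista out) := by unfold Spec_jogosCadaGrupo; infer_instance

-- ===== CLAIM (what is proved, stated in full; the proofs are below) =====
def Claim_equal_jogosCadaGrupo : Prop := ∀ (grupo : List String) (lista : List String), Dom_jogosCadaGrupo grupo lista → Pre_jogosCadaGrupo grupo lista → Spec_jogosCadaGrupo grupo lista (jogosCadaGrupo grupo lista)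

-- ===== LEMMAS AND PROOFS =====

-- All matches of a group as head-vs-rest pairs, the common normal form of both ports.
def pvPairs : List String → List String
  | [] => []
  | x :: xs => xs.map (fun y => x ++ " x " ++ y) ++ pvPairs xs

theorem pv_map_range_getD (xs : List String) (f : String → String) :
    (List.range xs.length).map (fun k => f (xs.getD k "")) = xs.map f := by
  induction xs with
  | nil => simp
  | cons x xs ih =>
    simp [List.range_succ_eq_map, List.map_map]
    exact ih

theorem pv_range'_succ_shift (s n : Nat) :
    List.range' (s + 1) n = (List.range' s n).map (· + 1) := by
  induction n generalizing s with
  | zero => rfl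
  | succ n ih => rw [List.range'_succ, List.range'_succ, List.map_cons, ih]

theorem pv_A_eq (g : List String) (lista : List String) (h : 2 ≤ g.length) :
    jogosCadaGrupo g lista = lista ++ pvPairs g := by
  induction g generalizing lista with
  | nil => simp at h
  | cons x xs ih =>
    cases xs with
    | nil => simp at h
    | cons y ys =>
      cases ys with
      | nil => simp [jogosCadaGrupo, pvPairs]
      | cons z zs =>
        rw [jogosCadaGrupo]
        have hc : (((x :: y :: z :: zs : List String)).length == 2) = false := by
          simp only [List.length_cons, beq_eq_false_iff_ne, ne_eq]
          omega
        rw [hc]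
        simp only [Bool.false_eq_true, if_false]
        rw [ih _ (by simp only [List.length_cons]; omega)]
        rw [show pvPairs (x :: y :: z :: zs)
              = (y :: z :: zs).map (fun t => x ++ " x " ++ t) ++ pvPairs (y :: z :: zs) from rfl]
        rw [List.append_assoc]

theorem pv_idx_eq (g : List String) :
    (List.range (g.length - 1)).flatMap (fun i =>
      (List.range' (i + 1) (g.length - (i + 1))).map (fun j =>
        g.getD i "" ++ " x " ++ g.getD j "")) = pvPairs g := by
  induction g with
  | nil => simp [pvPairs]
  | cons x xs ih =>
    cases xs with
    | nil => simp [pvPairs]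
    | cons y ys =>
      rw [show pvPairs (x :: y :: ys)
            = (y :: ys).map (fun t => x ++ " x " ++ t) ++ pvPairs (y :: ys) from rfl]
      rw [show ((x :: y :: ys : List String)).length - 1 = ys.length + 1 from by
            simp only [List.length_cons]; omega]
      rw [List.range_succ_eq_map, List.flatMap_cons, List.flatMap_map]
      congr 1
      · -- the i = 0 block: x against every later team
        rw [show ((x :: y :: ys : List String)).length - (0 + 1) = (y :: ys).length from by
              simp only [List.length_cons]; omega]
        rw [pv_range'_succ_shift 0, ← List.range_eq_range', List.map_map]
        rw [← pv_map_range_getD (y :: ys) (fun t => x ++ " x " ++ t)]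
        refine List.map_congr_left fun k _ => ?_
        simp [Function.comp]
      · -- the i ≥ 1 blocks: the same flatMap over the tail, indices shifted by one
        rw [← ih, show ((y :: ys : List String)).length - 1 = ys.length from by
              simp only [List.length_cons, Nat.add_sub_cancel]]
        refine List.flatMap_congr fun i _ => ?_
        rw [show ((x :: y :: ys : List String)).length - (Nat.succ i + 1)
              = (y :: ys).length - (i + 1) from by simp only [List.length_cons]; omega]
        rw [show (Nat.succ i + 1) = (i + 1) + 1 from rfl, pv_range'_succ_shift (i + 1),
            List.map_map]
        refine List.map_congr_left fun j _ => ?_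
        simp [Function.comp]

theorem pv_B_eq (g : List String) (lista : List String) :
    jogosCadaGrupo_alt g lista = lista ++ pvPairs g := by
  rw [jogosCadaGrupo_alt, pv_idx_eq]

-- ===== VERDICT (by name: the statement is the Claim_ definition above) =====
theorem jogosCadaGrupo_spec : Claim_equal_jogosCadaGrupo := by
  intro grupo lista _ hpre
  unfold Pre_jogosCadaGrupo at hpre
  unfold Spec_jogosCadaGrupo
  rw [pv_A_eq grupo lista hpre, pv_B_eq]
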